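-- pv_equiv track=rewrite | github.com/roxalanasinitsyna/password_analyzer | password_analyzer.py | check_password_characters
-- ===== SOURCE A (Python) =====
-- def check_password_characters(password: str) -> tuple[bool, bool, bool, bool]:
--     """Анализирует строку пароля на наличие различных типов символов.
--
--     :param password: Анализируемая строка пароля
--     :type password: str
--     :returns: Кортеж флагов наличия типов символов
--               (цифры, строчные, заглавные, специальные)
--     :rtype: tuple[bool, bool, bool, bool]
--     """
--     has_digits = False
--     has_lower = False
--     has_upper = False
--     has_special = False
--
--     for char in password:
--         if char.isdigit():
--             has_digits = True
--         elif char.islower():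
--             has_lower = True
--         elif char.isupper():
--             has_upper = True
--         elif not char.isalnum():
--             has_special = True
--
--     return has_digits, has_lower, has_upper, has_special
-- ===== SOURCE B (Python) =====
-- def check_password_characters(password: str) -> tuple[bool, bool, bool, bool]:
--     return (
--         any(c.isdigit() for c in password),
--         any(c.islower() for c in password),
--         any(c.isupper() for c in password),
--         any(not c.isalnum() for c in password),
--     )
-- ===== Notes on version B (the rewrite author's own statement) =====
-- stated objective: idiomatic
-- what changed: Replaces the single accumulating pass with a mutable-flag elif chain by four independent any(...) scans, each deriving one flag directly; correctness of dropping the elif guards rests on the four character classes being mutually exclusive.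
import Mathlib
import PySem

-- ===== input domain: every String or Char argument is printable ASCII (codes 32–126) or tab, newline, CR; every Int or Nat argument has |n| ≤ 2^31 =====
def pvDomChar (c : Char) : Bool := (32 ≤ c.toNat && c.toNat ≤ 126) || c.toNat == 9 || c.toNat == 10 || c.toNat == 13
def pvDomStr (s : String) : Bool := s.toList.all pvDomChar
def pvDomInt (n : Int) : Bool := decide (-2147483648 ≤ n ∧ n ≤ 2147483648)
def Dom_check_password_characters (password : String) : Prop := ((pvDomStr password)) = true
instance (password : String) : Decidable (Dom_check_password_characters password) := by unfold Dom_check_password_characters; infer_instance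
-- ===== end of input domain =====

-- B drops A's mutable flags and elif chain for four independent any-scans (idiomatic decomposition; same O(n) cost).

-- ===== PORT A =====
-- A: one pass, four mutable flags, elif chain in source order (the loop body is pvStepA).
def pvStepA (st : Bool × Bool × Bool × Bool) (char : Char) : Bool × Bool × Bool × Bool :=
  if PySem.Chars.isdigit char then (true, st.2.1, st.2.2.1, st.2.2.2)
  else if PySem.Chars.islower char then (st.1, true, st.2.2.1, st.2.2.2)
  else if PySem.Chars.isupper char then (st.1, st.2.1, true, st.2.2.2)
  else if !PySem.Chars.isalnum char then (st.1, st.2.1, st.2.2.1, true)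
  else st

def check_password_characters (password : String) : Bool × Bool × Bool × Bool :=
  password.toList.foldl pvStepA (false, false, false, false)

-- ===== PORT B =====
-- B: four independent any-scans, one per flag.
def check_password_characters_alt (password : String) : Bool × Bool × Bool × Bool :=
  (password.toList.any (fun c => PySem.Chars.isdigit c),
   password.toList.any (fun c => PySem.Chars.islower c),
   password.toList.any (fun c => PySem.Chars.isupper c),
   password.toList.any (fun c => !PySem.Chars.isalnum c))

-- ===== PRECONDITION & SPEC =====
def Spec_check_password_characters (password : String) (out : Bool × Bool × Bool × Bool) : Prop := out = check_password_characters_alt password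
instance (password : String) (out : Bool × Bool × Bool × Bool) : Decidable (Spec_check_password_characters password out) := by unfold Spec_check_password_characters; infer_instance

-- ===== CLAIM (what is proved, stated in full; the proofs are below) =====
def Claim_equal_check_password_characters : Prop := ∀ (password : String), Dom_check_password_characters password → Spec_check_password_characters password (check_password_characters password)

-- ===== LEMMAS AND PROOFS =====

-- The four character classes are mutually exclusive, so each elif branch's guard
-- reduces to its own plain test; the step then updates each flag independently.
theorem pvStep_eq (st : Bool × Bool × Bool × Bool) (c : Char) :
    pvStepA st c
    = (st.1 || PySem.Chars.isdigit c, st.2.1 || PySem.Chars.islower c,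
       st.2.2.1 || PySem.Chars.isupper c, st.2.2.2 || !PySem.Chars.isalnum c) := by
  simp only [pvStepA, PySem.Chars.isalnum, PySem.Chars.isalpha, PySem.Chars.isdigit,
    PySem.Chars.islower, PySem.Chars.isupper, Char.le_def, UInt32.le_iff_toNat_le]
  rcases st with ⟨a, b, d, e⟩
  split_ifs <;> simp_all <;> omega

theorem pvFold_eq (l : List Char) (st : Bool × Bool × Bool × Bool) :
    l.foldl pvStepA st
    = (st.1 || l.any (fun c => PySem.Chars.isdigit c),
       st.2.1 || l.any (fun c => PySem.Chars.islower c),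
       st.2.2.1 || l.any (fun c => PySem.Chars.isupper c),
       st.2.2.2 || l.any (fun c => !PySem.Chars.isalnum c)) := by
  induction l generalizing st with
  | nil => simp
  | cons c t ih =>
    simp only [List.foldl_cons, pvStep_eq, ih, List.any_cons]
    simp [Bool.or_assoc]


-- ===== VERDICT (by name: the statement is the Claim_ definition above) =====
theorem check_password_characters_spec : Claim_equal_check_password_characters := by
  intro password _
  show check_password_characters password = check_password_characters_alt password
  simp [check_password_characters, check_password_characters_alt, pvFold_eq]
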